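-- pv_equiv track=rewrite | github.com/nottyguru/Mayanagri-Client | generate_manifest.py | get_policy_for_file
-- ===== SOURCE A (Python) =====
-- POLICY_STRICT = 0  # Hashes must match (mods, critical configs)
--
-- POLICY_IGNORE = 1  # Skip if exists (player settings, local data)
--
-- POLICY_REPLACE = 2  # Force overwrite (rare)
--
-- def get_policy_for_file(filename, relative_path, custom_policies):
--     """
--     Returns the sync policy for a file using a Priority System.
--     """
--     # Ensure consistent forward slashes for matching
--     safe_path = relative_path.replace("\\", "/")
--
--     # PRIORITY 1: Exact file match (e.g., "config/custom_menu.json")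
--     if safe_path in custom_policies:
--         pol = custom_policies[safe_path].lower()
--         if pol == "ignore": return POLICY_IGNORE
--         if pol == "replace": return POLICY_REPLACE
--         if pol == "strict": return POLICY_STRICT
--
--     # PRIORITY 2: Folder match (e.g., "config/")
--     # Sort keys by length descending so deeper folders get checked before parent folders
--     for key in sorted(custom_policies.keys(), key=len, reverse=True):
--         if key.endswith("/") and safe_path.startswith(key):
--             pol = custom_policies[key].lower()
--             if pol == "ignore": return POLICY_IGNORE
--             if pol == "replace": return POLICY_REPLACE
--             if pol == "strict": return POLICY_STRICT
--
--     # PRIORITY 3: Default hardcoded ignore list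
--     ignore_files = [
--         "options.txt",
--         "servers.dat",
--         "in-game-account-switcher.properties",
--         "launcher_profiles.json",
--         "usercache.json",
--         "usernamecache.json",
--         "hotbar.nbt"
--     ]
--
--     if filename.lower() in ignore_files:
--         return POLICY_IGNORE
--
--     if safe_path.startswith("resourcepacks/"):
--         return POLICY_IGNORE
--
--     # PRIORITY 4: Default to Strict
--     return POLICY_STRICT
-- ===== SOURCE B (Python) =====
-- POLICY_STRICT = 0
-- POLICY_IGNORE = 1
-- POLICY_REPLACE = 2
--
-- _POL = {"ignore": POLICY_IGNORE, "replace": POLICY_REPLACE, "strict": POLICY_STRICT}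
--
-- _IGNORE_NAMES = {
--     "options.txt",
--     "servers.dat",
--     "in-game-account-switcher.properties",
--     "launcher_profiles.json",
--     "usercache.json",
--     "usernamecache.json",
--     "hotbar.nbt",
-- }
--
-- def get_policy_for_file(filename, relative_path, custom_policies):
--     safe_path = relative_path.replace("\\", "/")
--
--     # Priority 1: exact match with a recognized policy value
--     v = custom_policies.get(safe_path)
--     if v is not None:
--         p = _POL.get(v.lower())
--         if p is not None:
--             return p
--
--     # Priority 2: one linear pass keeping the longest matching folder key
--     # (no sort needed: matching folder keys are prefixes of safe_path, so
--     # the longest one is exactly what length-descending order would find)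
--     best = None
--     for key, val in custom_policies.items():
--         if (val.lower() in _POL and key.endswith("/") and safe_path.startswith(key)
--                 and (best is None or len(key) > len(best[0]))):
--             best = (key, val)
--     if best is not None:
--         return _POL[best[1].lower()]
--
--     # Priority 3: default ignore list
--     if filename.lower() in _IGNORE_NAMES:
--         return POLICY_IGNORE
--     if safe_path.startswith("resourcepacks/"):
--         return POLICY_IGNORE
--
--     # Priority 4
--     return POLICY_STRICT
-- ===== Notes on version B (the rewrite author's own statement) =====
-- stated objective: alternative
-- what changed: The folder-prefix matching no longer sorts all dict keys by length descending and scans the sorted list; B does one linear pass over the dict items keeping the longest matching folder key (matching folder keys are prefixes of the same path, so the longest one is unique and is exactly the key A's sorted scan finds first), and looks policies up in a precomputed name->policy dict instead of repeated if-chains.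
import Mathlib
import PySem

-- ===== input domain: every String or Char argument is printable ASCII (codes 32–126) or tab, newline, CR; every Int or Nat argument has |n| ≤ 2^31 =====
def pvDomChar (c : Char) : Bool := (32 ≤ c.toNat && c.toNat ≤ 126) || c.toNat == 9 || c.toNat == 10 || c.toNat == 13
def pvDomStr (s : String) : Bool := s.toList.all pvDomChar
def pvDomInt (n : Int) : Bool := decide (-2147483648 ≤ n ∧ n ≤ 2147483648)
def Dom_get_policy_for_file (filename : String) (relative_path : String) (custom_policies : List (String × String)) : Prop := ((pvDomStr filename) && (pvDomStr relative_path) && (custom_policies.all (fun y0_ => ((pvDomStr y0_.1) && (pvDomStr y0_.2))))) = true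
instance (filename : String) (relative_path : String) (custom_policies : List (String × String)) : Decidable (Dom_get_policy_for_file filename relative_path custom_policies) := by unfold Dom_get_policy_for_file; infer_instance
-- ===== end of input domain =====

-- B replaces A's sort-then-scan folder matching by one linear pass that keeps the longest
-- matching folder-prefix key (matching keys are prefixes of the same path, so the longest
-- one is unique and is exactly what A's length-descending scan finds first).

-- ===== PORT A =====
-- the 'for key in sorted(...)' loop: first key that ends with "/", prefixes safe_path and has a
-- recognized policy value returns that policy; otherwise the loop falls through (none)
def pa_loop (d : PySem.Dict String String) (safe : String) : List String → Option Int
  | [] => none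
  | key :: rest =>
    if PySem.Str.endswith key "/" && PySem.Str.startswith safe key then
      let pol := PySem.Str.lower (d.getD key "")
      if pol == "ignore" then some 1
      else if pol == "replace" then some 2
      else if pol == "strict" then some 0
      else pa_loop d safe rest
    else pa_loop d safe rest

def get_policy_for_file (filename : String) (relative_path : String) (custom_policies : List (String × String)) : Int :=
  let d : PySem.Dict String String := PySem.Dict.ofList custom_policies
  let safe_path := PySem.Str.replace relative_path "\\" "/"
  -- PRIORITY 1: exact file match (early returns become an Option)
  let prio1 : Option Int :=
    if d.contains safe_path then
      let pol := PySem.Str.lower (d.getD safe_path "")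
      if pol == "ignore" then some 1
      else if pol == "replace" then some 2
      else if pol == "strict" then some 0
      else none
    else none
  match prio1 with
  | some r => r
  | none =>
    -- PRIORITY 2: folder match over keys sorted by length descending
    match pa_loop d safe_path (PySem.List.sorted d.keys PySem.Str.len true) with
    | some r => r
    | none =>
      -- PRIORITY 3: default hardcoded ignore list
      let ignore_files : List String :=
        ["options.txt", "servers.dat", "in-game-account-switcher.properties",
         "launcher_profiles.json", "usercache.json", "usernamecache.json", "hotbar.nbt"]
      if ignore_files.contains (PySem.Str.lower filename) then 1
      else if PySem.Str.startswith safe_path "resourcepacks/" then 1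
      -- PRIORITY 4
      else 0

-- ===== PORT B =====
def pbPolMap : PySem.Dict String Int :=
  PySem.Dict.ofList [("ignore", 1), ("replace", 2), ("strict", 0)]

def pbIgnoreNames : PySem.Set String :=
  PySem.Set.ofList
    ["options.txt", "servers.dat", "in-game-account-switcher.properties",
     "launcher_profiles.json", "usercache.json", "usernamecache.json", "hotbar.nbt"]

-- the single linear pass: keep the longest matching folder key (with its value)
def pb_best (safe : String) : List (String × String) → Option (String × String) → Option (String × String)
  | [], best => best
  | (key, val) :: rest, best =>
    if pbPolMap.contains (PySem.Str.lower val) && PySem.Str.endswith key "/"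
        && PySem.Str.startswith safe key
        && (match best with | none => true | some b => decide (PySem.Str.len b.1 < PySem.Str.len key)) then
      pb_best safe rest (some (key, val))
    else
      pb_best safe rest best

def get_policy_for_file_alt (filename : String) (relative_path : String) (custom_policies : List (String × String)) : Int :=
  let d : PySem.Dict String String := PySem.Dict.ofList custom_policies
  let safe_path := PySem.Str.replace relative_path "\\" "/"
  -- Priority 1: exact match with a recognized policy value
  let prio1 : Option Int :=
    (d.get? safe_path).bind (fun v => pbPolMap.get? (PySem.Str.lower v))
  match prio1 with
  | some p => p
  | none =>
    -- Priority 2: one linear pass over the items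
    match pb_best safe_path d.items none with
    | some b => (pbPolMap.get? (PySem.Str.lower b.2)).getD 0  -- key always present for the kept item
    | none =>
      -- Priority 3 / 4
      if pbIgnoreNames.contains (PySem.Str.lower filename) then 1
      else if PySem.Str.startswith safe_path "resourcepacks/" then 1
      else 0

-- ===== PRECONDITION & SPEC =====
def Spec_get_policy_for_file (filename : String) (relative_path : String) (custom_policies : List (String × String)) (out : Int) : Prop := out = get_policy_for_file_alt filename relative_path custom_policies
instance (filename : String) (relative_path : String) (custom_policies : List (String × String)) (out : Int) : Decidable (Spec_get_policy_for_file filename relative_path custom_policies out) := by unfold Spec_get_policy_for_file; infer_instance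

-- ===== CLAIM (what is proved, stated in full; the proofs are below) =====
def Claim_equal_get_policy_for_file : Prop := ∀ (filename : String) (relative_path : String) (custom_policies : List (String × String)), Dom_get_policy_for_file filename relative_path custom_policies → Spec_get_policy_for_file filename relative_path custom_policies (get_policy_for_file filename relative_path custom_policies)

-- ===== LEMMAS AND PROOFS =====

-- abbreviations used only by the proofs
def paRec (pol : String) : Bool := pol == "ignore" || pol == "replace" || pol == "strict"
def paVal (pol : String) : Int := if pol == "ignore" then 1 else if pol == "replace" then 2 else 0
def matchA (d : PySem.Dict String String) (safe key : String) : Bool :=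
  PySem.Str.endswith key "/" && PySem.Str.startswith safe key && paRec (PySem.Str.lower (d.getD key ""))
def matchB (safe : String) (kv : String × String) : Bool :=
  pbPolMap.contains (PySem.Str.lower kv.2) && PySem.Str.endswith kv.1 "/" && PySem.Str.startswith safe kv.1

theorem pol_eq_mk : pbPolMap = PySem.Dict.mk [("ignore", 1), ("replace", 2), ("strict", 0)] := by decide

theorem pol_get? (s : String) : pbPolMap.get? s =
    (if s == "ignore" then some 1 else if s == "replace" then some 2 else if s == "strict" then some (0:Int) else none) := by
  by_cases h1 : s = "ignore"
  · subst h1; decide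
  · by_cases h2 : s = "replace"
    · subst h2; decide
    · by_cases h3 : s = "strict"
      · subst h3; decide
      · have h1' : ¬("ignore" = s) := fun e => h1 e.symm
        have h2' : ¬("replace" = s) := fun e => h2 e.symm
        have h3' : ¬("strict" = s) := fun e => h3 e.symm
        rw [pol_eq_mk]
        simp only [PySem.Dict.get?_mk_cons, beq_iff_eq, h1', h2', h3', if_false, h1, h2, h3]
        rfl

theorem pol_contains (s : String) : pbPolMap.contains s = paRec s := by
  rw [PySem.Dict.contains_eq_isSome_get?, pol_get?]
  unfold paRec
  cases h1 : s == "ignore" <;> cases h2 : s == "replace" <;> cases h3 : s == "strict" <;>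
    simp [h1, h2, h3]

theorem pol_getD (s : String) (h : paRec s = true) : (pbPolMap.get? s).getD 0 = paVal s := by
  rw [pol_get?]
  unfold paRec at h
  unfold paVal
  cases h1 : s == "ignore" <;> cases h2 : s == "replace" <;> cases h3 : s == "strict" <;>
    simp [h1, h2, h3] at h ⊢

theorem pa_loop_eq (d : PySem.Dict String String) (safe : String) (l : List String) :
    pa_loop d safe l = (l.find? (matchA d safe)).map (fun k => paVal (PySem.Str.lower (d.getD k ""))) := by
  induction l with
  | nil => simp [pa_loop]
  | cons key rest ih =>
    simp only [pa_loop]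
    cases he : PySem.Str.endswith key "/" <;> cases hs : PySem.Str.startswith safe key
    · have hM : matchA d safe key = false := by
        simp only [matchA, he, Bool.false_and]
      rw [List.find?_cons_of_neg (by simp [hM])]
      exact ih
    · have hM : matchA d safe key = false := by
        simp only [matchA, he, Bool.false_and]
      rw [List.find?_cons_of_neg (by simp [hM])]
      exact ih
    · have hM : matchA d safe key = false := by
        simp only [matchA, he, hs, Bool.true_and, Bool.false_and]
      rw [List.find?_cons_of_neg (by simp [hM])]
      exact ih
    · cases h1 : PySem.Str.lower (d.getD key "") == "ignore"
      · cases h2 : PySem.Str.lower (d.getD key "") == "replace"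
        · cases h3 : PySem.Str.lower (d.getD key "") == "strict"
          · have hM : matchA d safe key = false := by
              simp only [matchA, paRec, he, hs, h1, h2, h3, Bool.true_and, Bool.or_self,
                Bool.false_or, Bool.or_false]
            rw [List.find?_cons_of_neg (by simp [hM])]
            exact ih
          · have hM : matchA d safe key = true := by
              simp only [matchA, paRec, he, hs, h1, h2, h3, Bool.true_and, Bool.false_or,
                Bool.or_true, Bool.or_false]
            rw [List.find?_cons_of_pos hM]
            simp only [Option.map_some]
            rw [eq_of_beq h3]
            rfl
        · have hM : matchA d safe key = true := by
            simp only [matchA, paRec, he, hs, h1, h2, Bool.true_and, Bool.false_or,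
              Bool.true_or, Bool.or_true]
          rw [List.find?_cons_of_pos hM]
          simp only [Option.map_some]
          rw [eq_of_beq h2]
          rfl
      · have hM : matchA d safe key = true := by
          simp only [matchA, paRec, he, hs, h1, Bool.true_and, Bool.true_or]
        rw [List.find?_cons_of_pos hM]
        simp only [Option.map_some]
        rw [eq_of_beq h1]
        rfl

theorem find?_desc_max {α : Type} (f : α → Int) (P : α → Bool) (l : List α) (k : α)
    (hp : l.Pairwise (fun a b => f b ≤ f a)) (hk : l.find? P = some k) :
    ∀ k' ∈ l, P k' = true → f k' ≤ f k := by
  induction l with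
  | nil => simp at hk
  | cons a t ih =>
    rw [List.pairwise_cons] at hp
    rw [List.find?_cons] at hk
    intro k' hk' hP
    by_cases ha : P a
    · simp [ha] at hk
      subst hk
      rcases List.mem_cons.mp hk' with rfl | h
      · exact le_refl _
      · exact hp.1 k' h
    · simp [ha] at hk
      rcases List.mem_cons.mp hk' with rfl | h
      · simp [hP] at ha
      · exact ih hp.2 hk k' h hP

theorem prefix_len_eq {safe k1 k2 : String} (h1 : PySem.Str.startswith safe k1 = true)
    (h2 : PySem.Str.startswith safe k2 = true) (hl : PySem.Str.len k1 = PySem.Str.len k2) :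
    k1 = k2 := by
  rw [PySem.Str.startswith_eq, PySem.Chars.startswith_iff] at h1 h2
  rw [PySem.Str.len_eq, PySem.Str.len_eq] at hl
  have hlen : k1.toList.length = k2.toList.length := by exact_mod_cast hl
  have e1 := List.prefix_iff_eq_take.mp h1
  have e2 := List.prefix_iff_eq_take.mp h2
  have : k1.toList = k2.toList := by rw [e1, e2, hlen]
  exact String.toList_inj.mp this

theorem pb_best_none (safe : String) (l : List (String × String)) (acc : Option (String × String)) :
    pb_best safe l acc = none ↔ acc = none ∧ ∀ kv ∈ l, matchB safe kv = false := by
  induction l generalizing acc with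
  | nil => simp [pb_best]
  | cons kv rest ih =>
    obtain ⟨key, val⟩ := kv
    simp only [pb_best]
    split_ifs with hc
    · rw [ih]
      simp only [Bool.and_eq_true] at hc
      have hmB : matchB safe (key, val) = true := by
        simp only [matchB, Bool.and_eq_true]
        exact hc.1
      simp [hmB]
    · rw [ih]
      constructor
      · rintro ⟨hacc, hrest⟩
        subst hacc
        refine ⟨rfl, ?_⟩
        intro kv hkv
        rcases List.mem_cons.mp hkv with rfl | h
        · by_contra hmB
          rw [Bool.not_eq_false] at hmB
          simp only [matchB, Bool.and_eq_true] at hmB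
          apply hc
          simp only [Bool.and_eq_true]
          exact ⟨hmB, trivial⟩
        · exact hrest kv h
      · rintro ⟨hacc, hall⟩
        exact ⟨hacc, fun kv h => hall kv (List.mem_cons_of_mem _ h)⟩

theorem pb_best_some (safe : String) (l : List (String × String)) (acc : Option (String × String))
    (b : String × String) (h : pb_best safe l acc = some b) :
    ((b ∈ l ∧ matchB safe b = true) ∨ acc = some b) ∧
    (∀ kv ∈ l, matchB safe kv = true → PySem.Str.len kv.1 ≤ PySem.Str.len b.1) ∧
    (∀ a, acc = some a → PySem.Str.len a.1 ≤ PySem.Str.len b.1) := by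
  induction l generalizing acc with
  | nil =>
    simp only [pb_best] at h
    refine ⟨Or.inr h, by simp, ?_⟩
    intro a ha
    rw [ha] at h
    cases h
    exact le_refl _
  | cons kv rest ih =>
    obtain ⟨key, val⟩ := kv
    simp only [pb_best] at h
    split_ifs at h with hc
    · obtain ⟨G1, G2, G3⟩ := ih _ h
      have hkeyb : PySem.Str.len key ≤ PySem.Str.len b.1 := G3 (key, val) rfl
      simp only [Bool.and_eq_true] at hc
      have hmB : matchB safe (key, val) = true := by
        simp only [matchB, Bool.and_eq_true]
        exact hc.1
      refine ⟨?_, ?_, ?_⟩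
      · rcases G1 with ⟨hmem, hM⟩ | heq
        · exact Or.inl ⟨List.mem_cons_of_mem _ hmem, hM⟩
        · cases heq
          exact Or.inl ⟨List.mem_cons_self, hmB⟩
      · intro kv hkv hMkv
        rcases List.mem_cons.mp hkv with rfl | hmem
        · exact hkeyb
        · exact G2 kv hmem hMkv
      · intro a ha
        subst ha
        have h2 : decide (PySem.Str.len a.1 < PySem.Str.len key) = true := hc.2
        exact le_trans (le_of_lt (of_decide_eq_true h2)) hkeyb
    · obtain ⟨G1, G2, G3⟩ := ih _ h
      refine ⟨?_, ?_, G3⟩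
      · rcases G1 with ⟨hmem, hM⟩ | heq
        · exact Or.inl ⟨List.mem_cons_of_mem _ hmem, hM⟩
        · exact Or.inr heq
      · intro kv hkv hMkv
        rcases List.mem_cons.mp hkv with rfl | hmem
        · -- the head matches but was not taken: the accumulator must block it
          simp only [matchB, Bool.and_eq_true] at hMkv
          cases hacc : acc with
          | none =>
            exfalso
            apply hc
            rw [hacc]
            simp only [Bool.and_eq_true]
            exact ⟨hMkv, trivial⟩
          | some a =>
            have hnlt : ¬ (PySem.Str.len a.1 < PySem.Str.len key) := by
              intro hlt
              apply hc
              rw [hacc]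
              simp only [Bool.and_eq_true]
              exact ⟨hMkv, decide_eq_true hlt⟩
            exact le_trans (le_of_not_gt hnlt) (G3 a hacc)
        · exact G2 kv hmem hMkv

theorem matchAB (d : PySem.Dict String String) (safe : String) {k v : String}
    (hmem : (k, v) ∈ d.items) (hnd : d.keys.Nodup) :
    matchB safe (k, v) = matchA d safe k := by
  simp only [matchA, matchB, pol_contains, PySem.Dict.getD_of_mem_items d hmem hnd]
  cases paRec (PySem.Str.lower v) <;> cases PySem.Str.endswith k "/" <;>
    cases PySem.Str.startswith safe k <;> rfl

theorem prio1_eq (d : PySem.Dict String String) (safe : String) :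
    (if d.contains safe then
      (if PySem.Str.lower (d.getD safe "") == "ignore" then some 1
       else if PySem.Str.lower (d.getD safe "") == "replace" then some 2
       else if PySem.Str.lower (d.getD safe "") == "strict" then some (0:Int)
       else none)
     else none)
    = (d.get? safe).bind (fun v => pbPolMap.get? (PySem.Str.lower v)) := by
  cases hg : d.get? safe with
  | some v =>
    have hcon : d.contains safe = true := by
      rw [PySem.Dict.contains_eq_isSome_get?, hg]; rfl
    rw [PySem.Dict.getD_of_get?_eq_some d "" hg, hcon]
    show _ = pbPolMap.get? (PySem.Str.lower v)
    rw [pol_get?]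
    rfl
  | none =>
    have hcon : d.contains safe = false := by
      rw [PySem.Dict.contains_eq_isSome_get?, hg]; rfl
    rw [hcon]
    rfl

theorem prio2_eq (d : PySem.Dict String String) (safe : String) (hnd : d.keys.Nodup) :
    pa_loop d safe (PySem.List.sorted d.keys PySem.Str.len true)
    = (pb_best safe d.items none).map (fun b => (pbPolMap.get? (PySem.Str.lower b.2)).getD 0) := by
  have hperm := PySem.List.sorted_perm d.keys PySem.Str.len true
  rw [pa_loop_eq]
  cases hf : (PySem.List.sorted d.keys PySem.Str.len true).find? (matchA d safe) with
  | none =>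
    have hnone : ∀ k ∈ d.keys, matchA d safe k = false := by
      intro k hk
      have := List.find?_eq_none.mp hf k (hperm.mem_iff.mpr hk)
      simpa using this
    have : pb_best safe d.items none = none := by
      rw [pb_best_none]
      refine ⟨rfl, ?_⟩
      rintro ⟨k, v⟩ hkv
      rw [matchAB d safe hkv hnd]
      exact hnone k (PySem.Dict.mem_keys_of_mem_items d hkv)
    rw [this]
    rfl
  | some kA =>
    have hmA : matchA d safe kA = true := List.find?_some hf
    have hkAmemL : kA ∈ PySem.List.sorted d.keys PySem.Str.len true := List.mem_of_find?_eq_some hf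
    have hkAmem : kA ∈ d.keys := hperm.mem_iff.mp hkAmemL
    have hmaxA : ∀ k' ∈ d.keys, matchA d safe k' = true → PySem.Str.len k' ≤ PySem.Str.len kA := by
      intro k' hk' hM
      exact find?_desc_max PySem.Str.len (matchA d safe) _ kA
        (PySem.List.sorted_pairwise_rev d.keys PySem.Str.len) hf k' (hperm.mem_iff.mpr hk') hM
    -- a value paired with kA in the items
    obtain ⟨⟨kA', vA⟩, hpmem, hp1⟩ := List.mem_map.mp hkAmem
    have hpmem2 : (kA, vA) ∈ d.items := by rw [← hp1]; exact hpmem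
    -- B's pass cannot come back empty
    cases hb : pb_best safe d.items none with
    | none =>
      exfalso
      have := (pb_best_none safe d.items none).mp hb
      have hfalse := this.2 (kA, vA) hpmem2
      rw [matchAB d safe hpmem2 hnd, hmA] at hfalse
      exact (Bool.eq_not_self true).mp hfalse
    | some bb =>
      obtain ⟨G1, G2, _⟩ := pb_best_some safe d.items none bb hb
      have hbbmem : bb ∈ d.items ∧ matchB safe bb = true := by
        rcases G1 with h | h
        · exact h
        · cases h
      obtain ⟨bb1, bb2⟩ := bb
      have hbbitems : (bb1, bb2) ∈ d.items := hbbmem.1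
      have hmAbb : matchA d safe bb1 = true := by
        rw [← matchAB d safe hbbitems hnd]; exact hbbmem.2
      -- the two chosen keys have the same length, hence are equal
      have hle1 : PySem.Str.len bb1 ≤ PySem.Str.len kA :=
        hmaxA bb1 (PySem.Dict.mem_keys_of_mem_items d hbbitems) hmAbb
      have hle2 : PySem.Str.len kA ≤ PySem.Str.len bb1 := by
        have hMB : matchB safe (kA, vA) = true := by
          rw [matchAB d safe hpmem2 hnd]; exact hmA
        exact G2 (kA, vA) hpmem2 hMB
      have hsw1 : PySem.Str.startswith safe kA = true := by
        simp only [matchA, Bool.and_eq_true] at hmA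
        exact hmA.1.2
      have hsw2 : PySem.Str.startswith safe bb1 = true := by
        simp only [matchA, Bool.and_eq_true] at hmAbb
        exact hmAbb.1.2
      have hkeq : bb1 = kA := prefix_len_eq hsw2 hsw1 (le_antisymm hle1 hle2)
      subst hkeq
      have hgetD : d.getD bb1 "" = bb2 := PySem.Dict.getD_of_mem_items d hbbitems hnd ""
      have hrec : paRec (PySem.Str.lower bb2) = true := by
        have hx := hbbmem.2
        simp only [matchB, Bool.and_eq_true, pol_contains] at hx
        exact hx.1.1
      simp only [Option.map_some]
      rw [hgetD, pol_getD _ hrec]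

theorem ignore_eq (t : String) :
    pbIgnoreNames.contains t
    = (["options.txt", "servers.dat", "in-game-account-switcher.properties",
        "launcher_profiles.json", "usercache.json", "usernamecache.json", "hotbar.nbt"] : List String).contains t := by
  have h : pbIgnoreNames
      = ["options.txt", "servers.dat", "in-game-account-switcher.properties",
         "launcher_profiles.json", "usercache.json", "usernamecache.json", "hotbar.nbt"] := by decide
  rw [h]
  rfl

theorem ab_eq (filename relative_path : String) (custom_policies : List (String × String)) :
    get_policy_for_file filename relative_path custom_policies
    = get_policy_for_file_alt filename relative_path custom_policies := by
  simp only [get_policy_for_file, get_policy_for_file_alt]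
  have hnd : (PySem.Dict.ofList custom_policies : PySem.Dict String String).keys.Nodup :=
    PySem.Dict.nodup_keys_ofList custom_policies
  rw [prio1_eq]
  cases hg : (PySem.Dict.ofList custom_policies : PySem.Dict String String).get?
      (PySem.Str.replace relative_path "\\" "/") with
  | some v =>
    rw [Option.bind_some]
    cases hp : pbPolMap.get? (PySem.Str.lower v) with
    | some p => rfl
    | none =>
      rw [prio2_eq _ _ hnd]
      cases hb : pb_best (PySem.Str.replace relative_path "\\" "/")
          (PySem.Dict.ofList custom_policies : PySem.Dict String String).items none with
      | some b => simp only [Option.map_some]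
      | none =>
        simp only [Option.map_none]
        rw [ignore_eq]
  | none =>
    rw [Option.bind_none]
    rw [prio2_eq _ _ hnd]
    cases hb : pb_best (PySem.Str.replace relative_path "\\" "/")
        (PySem.Dict.ofList custom_policies : PySem.Dict String String).items none with
    | some b => simp only [Option.map_some]
    | none =>
      simp only [Option.map_none]
      rw [ignore_eq]

-- ===== VERDICT (by name: the statement is the Claim_ definition above) =====
theorem get_policy_for_file_spec : Claim_equal_get_policy_for_file := by
  intro filename relative_path custom_policies _
  unfold Spec_get_policy_for_file
  exact ab_eq filename relative_path custom_policies
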